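-- pv_equiv track=rewrite | github.com/Yeriimii/AlgorithmStudy | baekjoon/Gold/17406-배열 돌리기4.py | execute_rotate
-- ===== SOURCE A (Python) =====
-- def execute_rotate(start: tuple, end: tuple, _arr: list[list]):
--     if start == end:
--         return _arr
--     else:
--         tmp_1 = _arr[start[0]][end[1]]
--         tmp_2 = _arr[end[0]][start[1]]
--
--         # 시작점의 행: 종료점의 열부터 (시작점의 열 - 1)까지
--         for i in range(end[1], start[1], -1):
--             _arr[start[0]][i] = _arr[start[0]][i - 1]
--
--         # 종료점의 행: 시작점의 열부터 (종료점의 열 - 1)까지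
--         for i in range(start[1], end[1]):
--             _arr[end[0]][i] = _arr[end[0]][i + 1]
--
--         # 시작점의 열: 시점점의 행부터 (종료점의 행 - 2)까지
--         for i in range(start[0], end[0] - 1):
--             _arr[i][start[1]] = _arr[i + 1][start[1]]
--         _arr[end[0] - 1][start[1]] = tmp_2
--
--         # 종료점의 열: 종료점의 행부터 (시작점의 행 - 2)까지
--         for i in range(end[0], start[0] + 1, -1):
--             _arr[i][end[1]] = _arr[i - 1][end[1]]
--         _arr[start[0] + 1][end[1]] = tmp_1
--
--         next_start = (start[0] + 1, start[1] + 1)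
--         next_end = (end[0] - 1, end[1] - 1)
--         return execute_rotate(next_start, next_end, _arr)
-- ===== SOURCE B (Python) =====
-- def execute_rotate(start: tuple, end: tuple, _arr: list[list]):
--     # Per ring: gather the border values along the clockwise cycle, then
--     # scatter them back shifted one position; iterate rings inward.
--     s0, s1 = start
--     e0, e1 = end
--     while (s0, s1) != (e0, e1):
--         coords = (
--             [(s0, j) for j in range(s1, e1 + 1)]             # top row, left -> right
--             + [(i, e1) for i in range(s0 + 1, e0 + 1)]       # right col, top -> bottom
--             + [(e0, j) for j in range(e1 - 1, s1 - 1, -1)]   # bottom row, right -> left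
--             + [(i, s1) for i in range(e0 - 1, s0, -1)]       # left col, bottom -> top
--         )
--         vals = [_arr[i][j] for (i, j) in coords]
--         dests = coords[1:] + coords[:1]
--         for (i, j), v in zip(dests, vals):
--             _arr[i][j] = v
--         s0, s1, e0, e1 = s0 + 1, s1 + 1, e0 - 1, e1 - 1
--     return _arr
-- ===== Notes on version B (the rewrite author's own statement) =====
-- stated objective: alternative
-- what changed: Replaces the recursion with four interleaved read-write shift loops and two saved corners by an iterative gather-then-scatter per ring: build the clockwise border coordinate cycle, read all border values at once, then write them back shifted by one.
import Mathlib
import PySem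

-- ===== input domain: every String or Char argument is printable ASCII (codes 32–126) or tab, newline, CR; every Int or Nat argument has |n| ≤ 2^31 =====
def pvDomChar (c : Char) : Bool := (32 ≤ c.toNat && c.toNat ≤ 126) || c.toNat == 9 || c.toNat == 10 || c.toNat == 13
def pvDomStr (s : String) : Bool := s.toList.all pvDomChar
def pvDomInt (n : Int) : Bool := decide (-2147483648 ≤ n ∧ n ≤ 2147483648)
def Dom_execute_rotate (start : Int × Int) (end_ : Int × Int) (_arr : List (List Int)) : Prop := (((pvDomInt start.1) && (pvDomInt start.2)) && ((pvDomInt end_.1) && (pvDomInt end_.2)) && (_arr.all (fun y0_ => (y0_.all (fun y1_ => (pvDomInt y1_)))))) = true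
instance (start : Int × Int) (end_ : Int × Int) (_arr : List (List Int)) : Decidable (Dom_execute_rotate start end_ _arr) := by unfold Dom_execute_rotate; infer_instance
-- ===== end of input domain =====

-- B replaces A's recursion over four interleaved shift loops by an iterative per-ring
-- gather-then-scatter of the border cycle (alternative decomposition, same cost).
-- Note: the Python A mutates _arr in place and returns it; the equivalence proved
-- here is about the RETURN value (B performs the same in-place mutation).

-- ===== PORT A =====
-- `_arr[i][j]` (read) and `_arr[i][j] = v` (write), with Python's negative-index
-- wraparound.  Total forms: out-of-range reads give 0 / writes do nothing; Python
-- raises IndexError there, and Pre_execute_rotate excludes those inputs, so on the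
-- admitted domain these are exact.
def getCell (a : List (List Int)) (i j : Int) : Int :=
  PySem.List.pyGetD (PySem.List.pyGetD a i []) j 0

def setCell (a : List (List Int)) (i j : Int) (v : Int) : List (List Int) :=
  PySem.List.pySetD a i (PySem.List.pySetD (PySem.List.pyGetD a i []) j v)

-- A's recursion, made structural with a fuel counter; the top-level fuel
-- |end₀ - start₀| + 1 dominates the recursion depth on every input A terminates on
-- (A recurses (end₀-start₀)/2 times), so this is a faithful totalisation.
def rotA : Nat → Int × Int → Int × Int → List (List Int) → List (List Int)
  | 0, _, _, a => a
  | fuel+1, s, e, a =>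
    if s = e then a
    else
      let tmp1 := getCell a s.1 e.2
      let tmp2 := getCell a e.1 s.2
      let a1 := (PySem.List.pyRange e.2 s.2 (-1)).foldl
        (fun m i => setCell m s.1 i (getCell m s.1 (i-1))) a
      let a2 := (PySem.List.pyRange s.2 e.2 1).foldl
        (fun m i => setCell m e.1 i (getCell m e.1 (i+1))) a1
      let a3 := (PySem.List.pyRange s.1 (e.1-1) 1).foldl
        (fun m i => setCell m i s.2 (getCell m (i+1) s.2)) a2
      let a4 := setCell a3 (e.1-1) s.2 tmp2
      let a5 := (PySem.List.pyRange e.1 (s.1+1) (-1)).foldl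
        (fun m i => setCell m i e.2 (getCell m (i-1) e.2)) a4
      let a6 := setCell a5 (s.1+1) e.2 tmp1
      rotA fuel (s.1+1, s.2+1) (e.1-1, e.2-1) a6

def execute_rotate (start : Int × Int) (end_ : Int × Int) (_arr : List (List Int)) : List (List Int) :=
  rotA ((end_.1 - start.1).natAbs + 1) start end_ _arr

-- ===== PORT B =====
-- the clockwise border cycle of the ring (start corner first)
def ringCoords (s0 s1 e0 e1 : Int) : List (Int × Int) :=
  (PySem.List.pyRange s1 (e1+1) 1).map (fun j => (s0, j))
  ++ (PySem.List.pyRange (s0+1) (e0+1) 1).map (fun i => (i, e1))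
  ++ (PySem.List.pyRange (e1-1) (s1-1) (-1)).map (fun j => (e0, j))
  ++ (PySem.List.pyRange (e0-1) s0 (-1)).map (fun i => (i, s1))

-- B's while loop, same fuel totalisation as A's recursion
def rotB : Nat → Int → Int → Int → Int → List (List Int) → List (List Int)
  | 0, _, _, _, _, a => a
  | fuel+1, s0, s1, e0, e1, a =>
    if (s0, s1) = (e0, e1) then a
    else
      let coords := ringCoords s0 s1 e0 e1
      let vals := coords.map (fun p => getCell a p.1 p.2)
      let dests := PySem.List.slice coords (some 1) none ++ PySem.List.slice coords none (some 1)
      let a' := (dests.zip vals).foldl (fun m pv => setCell m pv.1.1 pv.1.2 pv.2) a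
      rotB fuel (s0+1) (s1+1) (e0-1) (e1-1) a'

def execute_rotate_alt (start : Int × Int) (end_ : Int × Int) (_arr : List (List Int)) : List (List Int) :=
  rotB ((end_.1 - start.1).natAbs + 1) start.1 start.2 end_.1 end_.2 _arr

-- ===== PRECONDITION & SPEC =====
-- Pre_ admits exactly the inputs on which A terminates without an exception and no
-- two distinct border coordinates alias the same physical cell.  It excludes (a)
-- inputs where A raises IndexError or recurses forever (RecursionError), and (b)
-- the corner where Python's negative-index wraparound makes two border coordinates
-- alias one cell: there the values produced by A's interleaved shifts and by B's
-- gather-then-scatter are both accidental and neither is the "right" one.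
def Pre_execute_rotate (start : Int × Int) (end_ : Int × Int) (_arr : List (List Int)) : Prop :=
  start = end_ ∨
    (end_.1 - start.1 = end_.2 - start.2 ∧ 0 < end_.1 - start.1 ∧ 2 ∣ (end_.1 - start.1) ∧
     -(_arr.length : Int) ≤ start.1 ∧ end_.1 < (_arr.length : Int) ∧
     end_.1 - start.1 < (_arr.length : Int) ∧
     ∀ i ∈ PySem.List.pyRange start.1 (end_.1 + 1) 1,
       -(((PySem.List.pyGetD _arr i ([] : List Int)).length : Int)) ≤ start.2 ∧
       end_.2 < ((PySem.List.pyGetD _arr i ([] : List Int)).length : Int) ∧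
       end_.1 - start.1 < ((PySem.List.pyGetD _arr i ([] : List Int)).length : Int))

instance (start : Int × Int) (end_ : Int × Int) (_arr : List (List Int)) : Decidable (Pre_execute_rotate start end_ _arr) := by
  unfold Pre_execute_rotate; infer_instance

def pvWitness_execute_rotate : (Int × Int) × (Int × Int) × List (List Int) :=
  ((0, 0), (2, 2), [[1, 2, 3], [4, 5, 6], [7, 8, 9]])

def Spec_execute_rotate (start : Int × Int) (end_ : Int × Int) (_arr : List (List Int)) (out : List (List Int)) : Prop := out = execute_rotate_alt start end_ _arr
instance (start : Int × Int) (end_ : Int × Int) (_arr : List (List Int)) (out : List (List Int)) : Decidable (Spec_execute_rotate start end_ _arr out) := by unfold Spec_execute_rotate; infer_instance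

-- ===== CLAIM (what is proved, stated in full; the proofs are below) =====
def Claim_equal_execute_rotate : Prop := ∀ (start : Int × Int) (end_ : Int × Int) (_arr : List (List Int)), Dom_execute_rotate start end_ _arr → Pre_execute_rotate start end_ _arr → Spec_execute_rotate start end_ _arr (execute_rotate start end_ _arr)

-- ===== LEMMAS AND PROOFS =====

def wr (n : Nat) (i : Int) : Nat := if 0 ≤ i then i.toNat else n - (-i).toNat

def rowLen (a : List (List Int)) (r : Nat) : Nat := (a.getD r []).length

def val (a : List (List Int)) (r c : Nat) : Int := (a.getD r []).getD c 0

lemma pyIdx_eq (n : Nat) (i : Int) (h1 : -(n:Int) ≤ i) (h2 : i < n) :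
    PySem.List.pyIdx? n i = some (wr n i) := by
  simp only [PySem.List.pyIdx?, wr]
  split_ifs with h <;> simp <;> omega

lemma wr_lt (n : Nat) (i : Int) (h1 : -(n:Int) ≤ i) (h2 : i < n) (h3 : 0 < n) :
    wr n i < n := by
  simp only [wr]; split_ifs with h <;> omega

lemma wr_inj (n : Nat) (lo hi x y : Int) (hlo : -(n:Int) ≤ lo) (hhi : hi < n)
    (hw : hi - lo < n) (hx1 : lo ≤ x) (hx2 : x ≤ hi) (hy1 : lo ≤ y) (hy2 : y ≤ hi)
    (h : wr n x = wr n y) : x = y := by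
  simp only [wr] at h; split_ifs at h <;> omega

lemma pyGetD_row (a : List (List Int)) (i : Int) (h1 : -(a.length:Int) ≤ i) (h2 : i < a.length) :
    PySem.List.pyGetD a i [] = a.getD (wr a.length i) [] := by
  have hn : 0 < a.length := by omega
  simp only [PySem.List.pyGetD, PySem.List.pyGet?, pyIdx_eq a.length i h1 h2, Option.bind_some]
  have := wr_lt a.length i h1 h2 hn
  simp [List.getD, List.getElem?_eq_getElem this]

lemma getCell_eq (a : List (List Int)) (i j : Int) (h1 : -(a.length:Int) ≤ i) (h2 : i < a.length)
    (hm1 : -((rowLen a (wr a.length i) : Nat) : Int) ≤ j) (hm2 : j < (rowLen a (wr a.length i) : Nat)) :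
    getCell a i j = val a (wr a.length i) (wr (rowLen a (wr a.length i)) j) := by
  have hn : 0 < a.length := by omega
  have hm : 0 < rowLen a (wr a.length i) := by omega
  simp only [getCell, pyGetD_row a i h1 h2]
  simp only [PySem.List.pyGetD, PySem.List.pyGet?, rowLen] at *
  rw [pyIdx_eq _ j hm1 hm2]
  have := wr_lt _ j hm1 hm2 hm
  simp [List.getD, List.getElem?_eq_getElem this, val, List.getD]

lemma length_setCell (a : List (List Int)) (i j : Int) (v : Int) :
    (setCell a i j v).length = a.length := by
  simp only [setCell, PySem.List.pySetD, PySem.List.pySet?]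
  cases h : PySem.List.pyIdx? a.length i <;> simp

lemma rowLen_setCell (a : List (List Int)) (i j : Int) (v : Int) (r : Nat) :
    rowLen (setCell a i j v) r = rowLen a r := by
  simp only [setCell, rowLen]
  rcases h : PySem.List.pyIdx? a.length i with _ | k
  · simp [PySem.List.pySetD, PySem.List.pySet?, h]
  · have hk : k < a.length := by
      simp only [PySem.List.pyIdx?] at h; split_ifs at h <;> simp_all <;> omega
    simp only [PySem.List.pySetD, PySem.List.pySet?, h, Option.map_some, Option.getD_some,
      PySem.List.pyGetD, PySem.List.pyGet?, Option.bind_some]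
    by_cases hr : r = k
    · subst hr
      simp [List.getD, List.getElem?_set_self, hk, List.getElem?_eq_getElem]
      rcases h2 : PySem.List.pyIdx? (a[r].length) j with _ | m
      · simp [h2]
      · have hm : m < a[r].length := by
          simp only [PySem.List.pyIdx?] at h2; split_ifs at h2 <;> simp_all <;> omega
        simp [h2]
    · simp [List.getD, List.getElem?_set_ne (by omega : k ≠ r)]

lemma setCell_eq (a : List (List Int)) (i j : Int) (v : Int)
    (h1 : -(a.length:Int) ≤ i) (h2 : i < a.length)
    (hm1 : -((rowLen a (wr a.length i) : Nat) : Int) ≤ j) (hm2 : j < (rowLen a (wr a.length i) : Nat)) :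
    setCell a i j v = a.set (wr a.length i) ((a.getD (wr a.length i) []).set (wr (rowLen a (wr a.length i)) j) v) := by
  simp only [setCell, pyGetD_row a i h1 h2, PySem.List.pySetD, PySem.List.pySet?,
    pyIdx_eq a.length i h1 h2]
  rw [pyIdx_eq _ j (by simpa [rowLen] using hm1) (by simpa [rowLen] using hm2)]
  simp [rowLen]

lemma val_setCell (a : List (List Int)) (i j : Int) (v : Int)
    (h1 : -(a.length:Int) ≤ i) (h2 : i < a.length)
    (hm1 : -((rowLen a (wr a.length i) : Nat) : Int) ≤ j) (hm2 : j < (rowLen a (wr a.length i) : Nat))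
    (r c : Nat) :
    val (setCell a i j v) r c =
      if r = wr a.length i ∧ c = wr (rowLen a (wr a.length i)) j then v
      else val a r c := by
  rw [setCell_eq a i j v h1 h2 hm1 hm2]
  have hn : 0 < a.length := by omega
  have hwr := wr_lt a.length i h1 h2 hn
  have hm : 0 < rowLen a (wr a.length i) := by omega
  have hwc := wr_lt _ j hm1 hm2 hm
  have hwc' : wr (rowLen a (wr a.length i)) j < (a.getD (wr a.length i) []).length := by
    simpa [rowLen] using hwc
  simp only [val, List.getD, List.getElem?_set]
  by_cases hr : wr a.length i = r
  · subst hr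
    simp only [if_pos rfl, hwr, if_true, Option.getD_some, true_and, List.getElem?_set]
    by_cases hc : wr (rowLen a (wr a.length i)) j = c
    · subst hc
      have hlen : (a[wr a.length i]?.getD ([]:List Int)).length = (a.getD (wr a.length i) []).length := by
        simp [List.getD]
      rw [if_pos rfl]
      simp [hlen, hwc']
    · simp [Ne.symm hc, hc]
  · simp [Ne.symm hr, hr]

lemma mat_ext (a b : List (List Int)) (hl : a.length = b.length)
    (hr : ∀ r, rowLen a r = rowLen b r)
    (hv : ∀ r c, r < a.length → c < rowLen a r → val a r c = val b r c) : a = b := by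
  apply List.ext_getElem hl
  intro r h1 h2
  apply List.ext_getElem
  · have := hr r; simpa [rowLen, List.getD, List.getElem?_eq_getElem, h1, h2] using this
  · intro c hc1 hc2
    have := hv r c h1 (by simpa [rowLen, List.getD, List.getElem?_eq_getElem h1] using hc1)
    simpa [val, List.getD, List.getElem?_eq_getElem, h1, h2, List.getElem?_eq_getElem hc1,
      List.getElem?_eq_getElem hc2] using this

def InW (s0 s1 e0 e1 : Int) (q : Int × Int) : Prop :=
  s0 ≤ q.1 ∧ q.1 ≤ e0 ∧ s1 ≤ q.2 ∧ q.2 ≤ e1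

def Valid (a : List (List Int)) (s0 s1 e0 e1 : Int) : Prop :=
  e0 - s0 = e1 - s1 ∧ 2 ≤ e0 - s0 ∧
  -(a.length : Int) ≤ s0 ∧ e0 < (a.length : Int) ∧ e0 - s0 < (a.length : Int) ∧
  ∀ i : Int, s0 ≤ i → i ≤ e0 →
    (-((rowLen a (wr a.length i) : Nat) : Int) ≤ s1 ∧ e1 < ((rowLen a (wr a.length i) : Nat) : Int) ∧
     e0 - s0 < ((rowLen a (wr a.length i) : Nat) : Int))

lemma Valid.rowBound {a s0 s1 e0 e1} (hV : Valid a s0 s1 e0 e1) {i : Int}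
    (h1 : s0 ≤ i) (h2 : i ≤ e0) :
    -(a.length:Int) ≤ i ∧ i < a.length ∧
    -((rowLen a (wr a.length i) : Nat) : Int) ≤ s1 ∧ e1 < ((rowLen a (wr a.length i) : Nat) : Int) := by
  obtain ⟨hd, hd2, hlo, hhi, hlt, hrow⟩ := hV
  exact ⟨by omega, by omega, (hrow i h1 h2).1, (hrow i h1 h2).2.1⟩

lemma Valid.congr {a b : List (List Int)} {s0 s1 e0 e1} (hV : Valid a s0 s1 e0 e1)
    (hl : b.length = a.length) (hr : ∀ r, rowLen b r = rowLen a r) : Valid b s0 s1 e0 e1 := by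
  obtain ⟨hd, hd2, hlo, hhi, hlt, hrow⟩ := hV
  exact ⟨hd, hd2, by omega, by omega, by omega, fun i h1 h2 => by
    rw [hl, hr]; exact hrow i h1 h2⟩

-- wrapped coordinates of two window points coincide only if the points are equal
lemma phys_inj {a s0 s1 e0 e1} (hV : Valid a s0 s1 e0 e1) {p q : Int × Int}
    (hp : InW s0 s1 e0 e1 p) (hq : InW s0 s1 e0 e1 q)
    (hrow : wr a.length p.1 = wr a.length q.1)
    (hcol : wr (rowLen a (wr a.length p.1)) p.2 = wr (rowLen a (wr a.length p.1)) q.2) : p = q := by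
  obtain ⟨hd, hd2, hlo, hhi, hlt, hrowb⟩ := hV
  obtain ⟨hp1, hp2, hp3, hp4⟩ := hp
  obtain ⟨hq1, hq2, hq3, hq4⟩ := hq
  have h1 : p.1 = q.1 := wr_inj a.length s0 e0 p.1 q.1 hlo (by omega) (by omega) hp1 hp2 hq1 hq2 hrow
  obtain ⟨hb1, hb2, hb3⟩ := hrowb p.1 hp1 hp2
  have h2 : p.2 = q.2 := wr_inj _ s1 e1 p.2 q.2 hb1 hb2 (by omega) hp3 hp4 hq3 hq4 hcol
  exact Prod.ext h1 h2

-- KEY: reading a window cell after writing a window cell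
lemma getCell_setCell {a s0 s1 e0 e1} (hV : Valid a s0 s1 e0 e1) {p q : Int × Int} (v : Int)
    (hp : InW s0 s1 e0 e1 p) (hq : InW s0 s1 e0 e1 q) :
    getCell (setCell a p.1 p.2 v) q.1 q.2 = if q = p then v else getCell a q.1 q.2 := by
  obtain ⟨hpa, hpb, hpc, hpd⟩ := hV.rowBound hp.1 hp.2.1
  obtain ⟨hqa, hqb, hqc, hqd⟩ := hV.rowBound hq.1 hq.2.1
  have hpc' : -((rowLen a (wr a.length p.1) : Nat) : Int) ≤ p.2 := by
    have := hp.2.2.1; omega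
  have hpd' : p.2 < ((rowLen a (wr a.length p.1) : Nat) : Int) := by
    have := hp.2.2.2; omega
  have hqc' : -((rowLen a (wr a.length q.1) : Nat) : Int) ≤ q.2 := by
    have := hq.2.2.1; omega
  have hqd' : q.2 < ((rowLen a (wr a.length q.1) : Nat) : Int) := by
    have := hq.2.2.2; omega
  have hlen := length_setCell a p.1 p.2 v
  have hrl := rowLen_setCell a p.1 p.2 v
  rw [getCell_eq (setCell a p.1 p.2 v) q.1 q.2 (by omega) (by omega)
      (by rw [hlen, hrl]; exact hqc') (by rw [hlen, hrl]; exact hqd')]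
  rw [hlen, hrl, val_setCell a p.1 p.2 v hpa hpb hpc' hpd']
  by_cases h : q = p
  · subst h; simp
  · rw [if_neg, if_neg h]
    · exact (getCell_eq a q.1 q.2 hqa hqb hqc' hqd').symm
    · rintro ⟨h1, h2⟩
      rw [← h1] at h2
      exact h (phys_inj hV hq hp h1 h2)

-- two writes at distinct window cells commute
lemma setCell_comm {a s0 s1 e0 e1} (hV : Valid a s0 s1 e0 e1) {p q : Int × Int} (v w : Int)
    (hp : InW s0 s1 e0 e1 p) (hq : InW s0 s1 e0 e1 q) (hne : p ≠ q) :
    setCell (setCell a p.1 p.2 v) q.1 q.2 w = setCell (setCell a q.1 q.2 w) p.1 p.2 v := by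
  obtain ⟨hpa, hpb, hpc, hpd⟩ := hV.rowBound hp.1 hp.2.1
  obtain ⟨hqa, hqb, hqc, hqd⟩ := hV.rowBound hq.1 hq.2.1
  have hpc' : -((rowLen a (wr a.length p.1) : Nat) : Int) ≤ p.2 := by have := hp.2.2.1; omega
  have hpd' : p.2 < ((rowLen a (wr a.length p.1) : Nat) : Int) := by have := hp.2.2.2; omega
  have hqc' : -((rowLen a (wr a.length q.1) : Nat) : Int) ≤ q.2 := by have := hq.2.2.1; omega
  have hqd' : q.2 < ((rowLen a (wr a.length q.1) : Nat) : Int) := by have := hq.2.2.2; omega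
  have hphys : ¬ (wr a.length q.1 = wr a.length p.1 ∧
      wr (rowLen a (wr a.length q.1)) q.2 = wr (rowLen a (wr a.length q.1)) p.2) := by
    rintro ⟨h1, h2⟩
    exact hne (phys_inj hV hq hp h1 h2).symm
  apply mat_ext
  · simp [length_setCell]
  · simp [rowLen_setCell]
  · intro r c hrb hcb
    have l1 := length_setCell a p.1 p.2 v
    have l2 := length_setCell a q.1 q.2 w
    have r1 := rowLen_setCell a p.1 p.2 v
    have r2 := rowLen_setCell a q.1 q.2 w
    rw [val_setCell _ q.1 q.2 w (by omega) (by omega) (by rw [l1, r1]; exact hqc') (by rw [l1, r1]; exact hqd'),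
        val_setCell _ p.1 p.2 v hpa hpb hpc' hpd',
        val_setCell _ p.1 p.2 v (by omega) (by omega) (by rw [l2, r2]; exact hpc') (by rw [l2, r2]; exact hpd'),
        val_setCell _ q.1 q.2 w hqa hqb hqc' hqd']
    simp only [l1, r1, l2, r2]
    by_cases h1 : r = wr a.length q.1 ∧ c = wr (rowLen a (wr a.length q.1)) q.2
    · rw [if_pos h1, if_neg, if_pos h1]
      rintro ⟨g1, g2⟩
      have hr' : wr a.length q.1 = wr a.length p.1 := by rw [← h1.1, g1]
      refine hphys ⟨hr', ?_⟩
      rw [← h1.2, g2, hr']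
    · rw [if_neg h1, if_neg h1]

def step (m : List (List Int)) (pv : (Int × Int) × Int) : List (List Int) :=
  setCell m pv.1.1 pv.1.2 pv.2

lemma length_foldl_step (ws : List ((Int × Int) × Int)) (a : List (List Int)) :
    (ws.foldl step a).length = a.length := by
  induction ws generalizing a with
  | nil => rfl
  | cons w ws ih => rw [List.foldl_cons, ih, step, length_setCell]

lemma rowLen_foldl_step (ws : List ((Int × Int) × Int)) (a : List (List Int)) (r : Nat) :
    rowLen (ws.foldl step a) r = rowLen a r := by
  induction ws generalizing a with
  | nil => rfl
  | cons w ws ih => rw [List.foldl_cons, ih, step, rowLen_setCell]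

lemma valid_step {a s0 s1 e0 e1} (hV : Valid a s0 s1 e0 e1) (pv : (Int × Int) × Int) :
    Valid (step a pv) s0 s1 e0 e1 :=
  hV.congr (length_setCell _ _ _ _) (rowLen_setCell _ _ _ _)

lemma valid_foldl {a s0 s1 e0 e1} (hV : Valid a s0 s1 e0 e1) (ws : List ((Int × Int) × Int)) :
    Valid (ws.foldl step a) s0 s1 e0 e1 :=
  hV.congr (length_foldl_step _ _) (rowLen_foldl_step _ _)

-- a window cell distinct from all written cells is untouched
lemma getCell_foldl_step {s0 s1 e0 e1 : Int} (ws : List ((Int × Int) × Int))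
    (a : List (List Int)) (hV : Valid a s0 s1 e0 e1) {q : Int × Int} (hq : InW s0 s1 e0 e1 q)
    (hws : ∀ w ∈ ws, InW s0 s1 e0 e1 w.1 ∧ w.1 ≠ q) :
    getCell (ws.foldl step a) q.1 q.2 = getCell a q.1 q.2 := by
  induction ws generalizing a with
  | nil => rfl
  | cons w ws ih =>
    rw [List.foldl_cons, ih (step a w) (valid_step hV w) (fun w' hw' => hws w' (by simp [hw']))]
    rw [step, getCell_setCell hV w.2 (hws w (by simp)).1 hq,
      if_neg (fun h => (hws w (by simp)).2 (by rw [h]))]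

-- read-write loop = precomputed batch writes, when no step reads a cell
-- written by an earlier step
lemma rw_loop_eq_batch {s0 s1 e0 e1 : Int} (cs : List ((Int × Int) × (Int × Int)))
    (a a₀ : List (List Int)) (hV : Valid a s0 s1 e0 e1)
    (hagree : ∀ c ∈ cs, getCell a c.2.1 c.2.2 = getCell a₀ c.2.1 c.2.2)
    (hin : ∀ c ∈ cs, InW s0 s1 e0 e1 c.1 ∧ InW s0 s1 e0 e1 c.2)
    (hpw : cs.Pairwise (fun x y => x.1 ≠ y.2)) :
    cs.foldl (fun m c => setCell m c.1.1 c.1.2 (getCell m c.2.1 c.2.2)) a =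
      (cs.map (fun c => (c.1, getCell a₀ c.2.1 c.2.2))).foldl step a := by
  induction cs generalizing a with
  | nil => rfl
  | cons c cs ih =>
    rw [List.foldl_cons, List.map_cons, List.foldl_cons]
    have hc := hin c (by simp)
    have hv1 : getCell a c.2.1 c.2.2 = getCell a₀ c.2.1 c.2.2 := hagree c (by simp)
    rw [hv1]
    have hstep : setCell a c.1.1 c.1.2 (getCell a₀ c.2.1 c.2.2) =
        step a (c.1, getCell a₀ c.2.1 c.2.2) := rfl
    rw [hstep]
    apply ih
    · exact valid_step hV _
    · intro c' hc'
      rw [step, getCell_setCell hV _ hc.1 (hin c' (by simp [hc'])).2,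
        if_neg (fun h => (List.pairwise_cons.mp hpw).1 c' hc' (by rw [h])), hagree c' (by simp [hc'])]
    · intro c' hc'; exact hin c' (by simp [hc'])
    · exact (List.pairwise_cons.mp hpw).2

-- foldl over writes is invariant under permutation when each window cell is
-- written with a unique value
lemma foldl_step_perm {s0 s1 e0 e1 : Int} {l l' : List ((Int × Int) × Int)}
    (hperm : l.Perm l') (a : List (List Int)) (hV : Valid a s0 s1 e0 e1)
    (hin : ∀ w ∈ l, InW s0 s1 e0 e1 w.1)
    (huniq : ∀ w ∈ l, ∀ w' ∈ l, w.1 = w'.1 → w = w') :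
    l.foldl step a = l'.foldl step a := by
  induction hperm generalizing a with
  | nil => rfl
  | cons x h ih =>
    rw [List.foldl_cons, List.foldl_cons]
    exact ih (step a x) (valid_step hV x) (fun w hw => hin w (by simp [hw]))
      (fun w hw w' hw' => huniq w (by simp [hw]) w' (by simp [hw']))
  | swap x y l =>
    rw [List.foldl_cons, List.foldl_cons, List.foldl_cons, List.foldl_cons]
    by_cases hxy : y = x
    · rw [hxy]
    · have hne : y.1 ≠ x.1 := fun h => hxy (huniq y (by simp) x (by simp) h)
      rw [show step (step a y) x = setCell (setCell a y.1.1 y.1.2 y.2) x.1.1 x.1.2 x.2 from rfl,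
        setCell_comm hV y.2 x.2 (hin y (by simp)) (hin x (by simp)) (fun h => hne (by rw [h]))]
      rfl
  | trans h1 h2 ih1 ih2 =>
    rw [ih1 a hV hin huniq, ih2 a hV (fun w hw => hin w (h1.mem_iff.mpr hw))
      (fun w hw w' hw' => huniq w (h1.mem_iff.mpr hw) w' (h1.mem_iff.mpr hw'))]

-- indexed segments: every range/loop list in the two ports is a `seg`
def seg {α : Type} (f : Nat → α) (c : Nat) : List α := (List.range c).map f

lemma length_seg {α : Type} (f : Nat → α) (c : Nat) : (seg f c).length = c := by
  simp [seg]

lemma getElem_seg {α : Type} (f : Nat → α) (c k : Nat) (h : k < (seg f c).length) :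
    (seg f c)[k] = f k := by
  simp [seg]

lemma seg_congr {α : Type} {f h : Nat → α} {c : Nat} (he : ∀ k, k < c → f k = h k) :
    seg f c = seg h c := by
  apply List.map_congr_left; intro k hk; exact he k (List.mem_range.mp hk)

lemma mem_seg {α : Type} {f : Nat → α} {c : Nat} {x : α} :
    x ∈ seg f c ↔ ∃ k, k < c ∧ f k = x := by
  simp [seg, List.mem_map, List.mem_range]

lemma seg_glue {α : Type} (f h : Nat → α) (c1 c2 : Nat) :
    seg f c1 ++ seg h c2 = seg (fun k => if k < c1 then f k else h (k - c1)) (c1 + c2) := by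
  apply List.ext_getElem
  · simp [length_seg]
  · intro k h1 h2
    rw [getElem_seg]
    by_cases hk : k < c1
    · rw [List.getElem_append_left (by simp [length_seg]; omega), getElem_seg, if_pos hk]
    · rw [List.getElem_append_right (by simp [length_seg]; omega), getElem_seg, if_neg hk,
        length_seg]

lemma drop_one_seg {α : Type} (f : Nat → α) (c : Nat) :
    (seg f c).drop 1 = seg (fun k => f (k + 1)) (c - 1) := by
  apply List.ext_getElem
  · simp [length_seg]
  · intro k h1 h2
    rw [List.getElem_drop, getElem_seg, getElem_seg]
    congr 1; omega

lemma take_one_seg {α : Type} (f : Nat → α) (c : Nat) (h : 0 < c) :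
    (seg f c).take 1 = [f 0] := by
  apply List.ext_getElem
  · simp [length_seg]; omega
  · intro k h1 h2
    simp only [List.length_take, length_seg] at h1
    rw [List.getElem_take, getElem_seg]
    have : k = 0 := by simp at h2; omega
    subst this; simp

lemma reverse_seg {α : Type} (f : Nat → α) (c : Nat) :
    (seg f c).reverse = seg (fun k => f (c - 1 - k)) c := by
  apply List.ext_getElem
  · simp [length_seg]
  · intro k h1 h2
    rw [List.getElem_reverse, getElem_seg, getElem_seg]
    congr 1
    simp only [length_seg] at h1 h2 ⊢

lemma map_seg {α β : Type} (f : Nat → α) (h : α → β) (c : Nat) :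
    (seg f c).map h = seg (fun k => h (f k)) c := by
  simp [seg, List.map_map]

lemma zip_seg {α β : Type} (f : Nat → α) (h : Nat → β) (c : Nat) :
    (seg f c).zip (seg h c) = seg (fun k => (f k, h k)) c := by
  simp [seg, List.zip_map']

lemma pairwise_seg {α : Type} {R : α → α → Prop} {f : Nat → α} {c : Nat}
    (h : ∀ i j, i < j → j < c → R (f i) (f j)) : (seg f c).Pairwise R := by
  apply List.Pairwise.map
  · exact fun i j hij => hij
  · exact (List.pairwise_lt_range).imp_of_mem (by
      intro i j hi hj hij
      exact h i j hij (List.mem_range.mp hj))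

lemma pyRange_one_seg (a b : Int) : PySem.List.pyRange a b 1 = seg (fun k => a + k) (b - a).toNat := by
  simp only [PySem.List.pyRange, seg]
  norm_num
  split_ifs with h1
  · rfl
  · simp [show (b - a).toNat = 0 by omega]

lemma pyRange_neg_one_seg (a b : Int) : PySem.List.pyRange a b (-1) = seg (fun k => a - k) (a - b).toNat := by
  simp only [PySem.List.pyRange, seg]
  norm_num
  split_ifs with h1 <;> [skip; simp [show (a - b).toNat = 0 by omega]]
  apply List.map_congr_left; intro k hk; ring

-- clockwise predecessor of a border cell
def predq (s0 s1 e0 e1 : Int) (q : Int × Int) : Int × Int :=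
  if q.1 = s0 ∧ s1 < q.2 then (s0, q.2 - 1)
  else if q.2 = e1 ∧ s0 < q.1 then (q.1 - 1, e1)
  else if q.1 = e0 ∧ q.2 < e1 then (e0, q.2 + 1)
  else (q.1 + 1, s1)

-- the k-th border cell, clockwise from the start corner
def ringC (s0 s1 e0 e1 : Int) (d k : Nat) : Int × Int :=
  if k ≤ d then (s0, s1 + (k : Int))
  else if k ≤ 2*d then (s0 + ((k : Int) - d), e1)
  else if k ≤ 3*d then (e0, e1 - ((k : Int) - 2*d))
  else (e0 - ((k : Int) - 3*d), s1)

-- the write a border cell receives: the value of its clockwise predecessor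
def gW (a : List (List Int)) (s0 s1 e0 e1 : Int) (q : Int × Int) : (Int × Int) × Int :=
  (q, getCell a (predq s0 s1 e0 e1 q).1 (predq s0 s1 e0 e1 q).2)

lemma singleton_seg {α : Type} (x : α) : [x] = seg (fun _ => x) 1 := by simp [seg]

lemma coords_seg {s0 s1 e0 e1 : Int} {d : Nat} (hd0 : (d:Int) = e0 - s0)
    (hd1 : (d:Int) = e1 - s1) (hd2 : 2 ≤ d) :
    ringCoords s0 s1 e0 e1 = seg (ringC s0 s1 e0 e1 d) (4*d) := by
  unfold ringCoords
  rw [pyRange_one_seg, pyRange_one_seg, pyRange_neg_one_seg, pyRange_neg_one_seg,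
    map_seg, map_seg, map_seg, map_seg]
  rw [show (e1 + 1 - s1).toNat = d + 1 by omega, show (e0 + 1 - (s0 + 1)).toNat = d by omega,
    show (e1 - 1 - (s1 - 1)).toNat = d by omega, show (e0 - 1 - s0).toNat = d - 1 by omega]
  rw [seg_glue, seg_glue, seg_glue]
  rw [show d + 1 + d + d + (d - 1) = 4*d by omega]
  apply seg_congr
  intro k hk
  simp only [ringC]
  split_ifs <;> simp only [Prod.mk.injEq, and_true, true_and] <;> omega

lemma inW_ringC {s0 s1 e0 e1 : Int} {d : Nat} (hd0 : (d:Int) = e0 - s0)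
    (hd1 : (d:Int) = e1 - s1) (hd2 : 2 ≤ d) {k : Nat} (hk : k < 4*d) :
    InW s0 s1 e0 e1 (ringC s0 s1 e0 e1 d k) := by
  simp only [ringC, InW]
  split_ifs <;> refine ⟨?_, ?_, ?_, ?_⟩ <;> simp <;> omega

lemma pred_ringC {s0 s1 e0 e1 : Int} {d : Nat} (hd0 : (d:Int) = e0 - s0)
    (hd1 : (d:Int) = e1 - s1) (hd2 : 2 ≤ d) {k : Nat} (hk : k + 1 < 4*d) :
    predq s0 s1 e0 e1 (ringC s0 s1 e0 e1 d (k+1)) = ringC s0 s1 e0 e1 d k := by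
  simp only [ringC, predq]
  split_ifs <;> simp only [Prod.mk.injEq, and_true, true_and] at * <;> omega

lemma pred_ringC_zero {s0 s1 e0 e1 : Int} {d : Nat} (hd0 : (d:Int) = e0 - s0)
    (hd1 : (d:Int) = e1 - s1) (hd2 : 2 ≤ d) :
    predq s0 s1 e0 e1 (ringC s0 s1 e0 e1 d 0) = ringC s0 s1 e0 e1 d (4*d - 1) := by
  simp only [ringC, predq]
  split_ifs <;> simp only [Prod.mk.injEq, and_true, true_and] at * <;> omega

-- the scatter destination cycle: each cell's clockwise successor, wrapping at the end
def destC (s0 s1 e0 e1 : Int) (d k : Nat) : Int × Int :=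
  if k + 1 < 4*d then ringC s0 s1 e0 e1 d (k+1) else ringC s0 s1 e0 e1 d 0

lemma bodyB_eq {s0 s1 e0 e1 : Int} {d : Nat} (hd0 : (d:Int) = e0 - s0)
    (hd1 : (d:Int) = e1 - s1) (hd2 : 2 ≤ d) (a : List (List Int)) :
    ((PySem.List.slice (ringCoords s0 s1 e0 e1) (some 1) none ++
      PySem.List.slice (ringCoords s0 s1 e0 e1) none (some 1)).zip
        ((ringCoords s0 s1 e0 e1).map (fun p => getCell a p.1 p.2))).foldl
      (fun m pv => setCell m pv.1.1 pv.1.2 pv.2) a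
    = ((seg (destC s0 s1 e0 e1 d) (4*d)).map (gW a s0 s1 e0 e1)).foldl step a := by
  rw [coords_seg hd0 hd1 hd2]
  rw [PySem.List.slice_from, PySem.List.slice_to]
  simp only [Int.toNat_one]
  rw [drop_one_seg, take_one_seg _ _ (by omega), singleton_seg, seg_glue,
    show 4*d - 1 + 1 = 4*d by omega, map_seg, map_seg, zip_seg]
  have : (seg (fun k => (if k < 4*d - 1 then ringC s0 s1 e0 e1 d (k + 1) else ringC s0 s1 e0 e1 d 0,
      getCell a (ringC s0 s1 e0 e1 d k).1 (ringC s0 s1 e0 e1 d k).2)) (4*d)) =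
      seg (fun k => gW a s0 s1 e0 e1 (destC s0 s1 e0 e1 d k)) (4*d) := by
    apply seg_congr
    intro k hk
    simp only [gW, destC]
    by_cases h : k + 1 < 4*d
    · rw [if_pos (by omega), if_pos h, pred_ringC hd0 hd1 hd2 h]
    · rw [if_neg (by omega), if_neg h, pred_ringC_zero hd0 hd1 hd2,
        show 4*d - 1 = k by omega]
  rw [this]
  · rfl
  all_goals norm_num

def rwStep (m : List (List Int)) (c : (Int × Int) × (Int × Int)) : List (List Int) :=
  setCell m c.1.1 c.1.2 (getCell m c.2.1 c.2.2)

-- one of A's shift loops, run after the batch writes W0: it equals appending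
-- its own batch (with all values read from the original matrix)
lemma loop_step {s0 s1 e0 e1 : Int} {c : Nat} (dst src : Nat → Int × Int)
    (W0 : List ((Int × Int) × Int)) (a : List (List Int)) (hV : Valid a s0 s1 e0 e1)
    (hin : ∀ k, k < c → InW s0 s1 e0 e1 (dst k) ∧ InW s0 s1 e0 e1 (src k))
    (hpw : ∀ i j, i < j → j < c → dst i ≠ src j)
    (hag : ∀ k, k < c → ∀ w ∈ W0, InW s0 s1 e0 e1 w.1 ∧ w.1 ≠ src k) :
    (seg (fun k => (dst k, src k)) c).foldl rwStep (W0.foldl step a)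
      = ((W0 ++ seg (fun k => (dst k, getCell a (src k).1 (src k).2)) c).foldl step a) := by
  rw [List.foldl_append]
  have hV' : Valid (W0.foldl step a) s0 s1 e0 e1 := valid_foldl hV W0
  have hagree : ∀ p ∈ seg (fun k => (dst k, src k)) c,
      getCell (W0.foldl step a) p.2.1 p.2.2 = getCell a p.2.1 p.2.2 := by
    intro p hp
    obtain ⟨k, hk, rfl⟩ := mem_seg.mp hp
    exact getCell_foldl_step W0 a hV (hin k hk).2 (hag k hk)
  have hinm : ∀ p ∈ seg (fun k => (dst k, src k)) c,
      InW s0 s1 e0 e1 p.1 ∧ InW s0 s1 e0 e1 p.2 := by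
    intro p hp
    obtain ⟨k, hk, rfl⟩ := mem_seg.mp hp
    exact hin k hk
  have hpw' : (seg (fun k => (dst k, src k)) c).Pairwise (fun x y => x.1 ≠ y.2) := by
    apply pairwise_seg
    intro i j hij hj
    exact hpw i j hij hj
  have := rw_loop_eq_batch (seg (fun k => (dst k, src k)) c) (W0.foldl step a) a hV' hagree hinm hpw'
  rw [show (seg (fun k => (dst k, src k)) c).foldl rwStep (W0.foldl step a)
      = (seg (fun k => (dst k, src k)) c).foldl
          (fun m c => setCell m c.1.1 c.1.2 (getCell m c.2.1 c.2.2)) (W0.foldl step a) from rfl,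
    this, map_seg]


lemma predq_top {s0 s1 e0 e1 c : Int} (h1 : s1 < c) :
    predq s0 s1 e0 e1 (s0, c) = (s0, c - 1) := by
  simp only [predq, Prod.mk.injEq]
  split_ifs <;> simp_all <;> omega

lemma predq_bottom {s0 s1 e0 e1 c : Int} (h0 : s0 < e0) (h2 : c < e1) :
    predq s0 s1 e0 e1 (e0, c) = (e0, c + 1) := by
  simp only [predq, Prod.mk.injEq]
  split_ifs <;> simp_all <;> omega

lemma predq_left {s0 s1 e0 e1 r : Int} (h1 : r < e0) (h2 : s1 < e1) :
    predq s0 s1 e0 e1 (r, s1) = (r + 1, s1) := by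
  simp only [predq, Prod.mk.injEq]
  split_ifs <;> simp_all <;> omega

lemma predq_right {s0 s1 e0 e1 r : Int} (h1 : s0 < r) :
    predq s0 s1 e0 e1 (r, e1) = (r - 1, e1) := by
  simp only [predq, Prod.mk.injEq]
  split_ifs <;> simp_all <;> omega

lemma bodyA_eq {s0 s1 e0 e1 : Int} {d : Nat} (hd0 : (d:Int) = e0 - s0)
    (hd1 : (d:Int) = e1 - s1) (hd2 : 2 ≤ d) (a : List (List Int))
    (hV : Valid a s0 s1 e0 e1) :
    setCell
      ((PySem.List.pyRange e0 (s0+1) (-1)).foldl (fun m i => setCell m i e1 (getCell m (i-1) e1))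
        (setCell
          ((PySem.List.pyRange s0 (e0-1) 1).foldl (fun m i => setCell m i s1 (getCell m (i+1) s1))
            ((PySem.List.pyRange s1 e1 1).foldl (fun m i => setCell m e0 i (getCell m e0 (i+1)))
              ((PySem.List.pyRange e1 s1 (-1)).foldl (fun m i => setCell m s0 i (getCell m s0 (i-1))) a)))
          (e0-1) s1 (getCell a e0 s1)))
      (s0+1) e1 (getCell a s0 e1)
    = ((seg (fun k => ((s0 : Int), e1 - (k:Int))) d
        ++ seg (fun k => ((e0 : Int), s1 + (k:Int))) d
        ++ seg (fun k => ((s0 + (k:Int), (s1 : Int))) ) (d-1)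
        ++ [((e0 - 1, s1) : Int × Int)]
        ++ seg (fun k => ((e0 - (k:Int), (e1 : Int))) ) (d-1)
        ++ [((s0 + 1, e1) : Int × Int)]).map (gW a s0 s1 e0 e1)).foldl step a := by
  have hinW : ∀ p : Int × Int, s0 ≤ p.1 → p.1 ≤ e0 → s1 ≤ p.2 → p.2 ≤ e1 → InW s0 s1 e0 e1 p :=
    fun p h1 h2 h3 h4 => ⟨h1, h2, h3, h4⟩
  -- loop 1 (top row, right to left)
  have c1 : ∀ X, (PySem.List.pyRange e1 s1 (-1)).foldl (fun m i => setCell m s0 i (getCell m s0 (i-1))) X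
      = (seg (fun k => (((s0 : Int), e1 - (k:Int)), ((s0:Int), e1 - (k:Int) - 1))) d).foldl rwStep X := by
    intro X
    rw [pyRange_neg_one_seg, show (e1 - s1).toNat = d by omega,
      show (seg (fun k => (((s0 : Int), e1 - (k:Int)), ((s0:Int), e1 - (k:Int) - 1))) d)
        = (seg (fun k => e1 - (k:Int)) d).map (fun i => ((s0, i), (s0, i - 1))) by rw [map_seg],
      List.foldl_map]
    rfl
  have c2 : ∀ X, (PySem.List.pyRange s1 e1 1).foldl (fun m i => setCell m e0 i (getCell m e0 (i+1))) X
      = (seg (fun k => (((e0 : Int), s1 + (k:Int)), ((e0:Int), s1 + (k:Int) + 1))) d).foldl rwStep X := by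
    intro X
    rw [pyRange_one_seg, show (e1 - s1).toNat = d by omega,
      show (seg (fun k => (((e0 : Int), s1 + (k:Int)), ((e0:Int), s1 + (k:Int) + 1))) d)
        = (seg (fun k => s1 + (k:Int)) d).map (fun i => ((e0, i), (e0, i + 1))) by rw [map_seg],
      List.foldl_map]
    rfl
  have c3 : ∀ X, (PySem.List.pyRange s0 (e0-1) 1).foldl (fun m i => setCell m i s1 (getCell m (i+1) s1)) X
      = (seg (fun k => ((s0 + (k:Int), (s1 : Int)), (s0 + (k:Int) + 1, (s1:Int)))) (d-1)).foldl rwStep X := by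
    intro X
    rw [pyRange_one_seg, show (e0 - 1 - s0).toNat = d - 1 by omega,
      show (seg (fun k => ((s0 + (k:Int), (s1 : Int)), (s0 + (k:Int) + 1, (s1:Int)))) (d-1))
        = (seg (fun k => s0 + (k:Int)) (d-1)).map (fun i => ((i, s1), (i + 1, s1))) by rw [map_seg],
      List.foldl_map]
    rfl
  have c4 : ∀ X, (PySem.List.pyRange e0 (s0+1) (-1)).foldl (fun m i => setCell m i e1 (getCell m (i-1) e1)) X
      = (seg (fun k => ((e0 - (k:Int), (e1 : Int)), (e0 - (k:Int) - 1, (e1:Int)))) (d-1)).foldl rwStep X := by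
    intro X
    rw [pyRange_neg_one_seg, show (e0 - (s0+1)).toNat = d - 1 by omega,
      show (seg (fun k => ((e0 - (k:Int), (e1 : Int)), (e0 - (k:Int) - 1, (e1:Int)))) (d-1))
        = (seg (fun k => e0 - (k:Int)) (d-1)).map (fun i => ((i, e1), (i - 1, e1))) by rw [map_seg],
      List.foldl_map]
    rfl
  rw [c1, c2, c3, c4]
  -- apply the four batch steps in turn
  have h1 := loop_step (s0 := s0) (s1 := s1) (e0 := e0) (e1 := e1) (c := d)
    (fun k => ((s0 : Int), e1 - (k:Int))) (fun k => ((s0:Int), e1 - (k:Int) - 1)) [] a hV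
    (by intro k hk; refine ⟨⟨?_,?_,?_,?_⟩,⟨?_,?_,?_,?_⟩⟩ <;> simp <;> omega)
    (by intro i j hij hj; simp only [ne_eq, Prod.mk.injEq, not_and]; omega)
    (by intro k hk w hw; simp at hw)
  rw [List.nil_append] at h1
  rw [show (List.foldl rwStep a) = (List.foldl rwStep (List.foldl step a [])) from rfl, h1]
  -- loop 2 (bottom row, left to right)
  have h2 := loop_step (s0 := s0) (s1 := s1) (e0 := e0) (e1 := e1) (c := d)
    (fun k => ((e0 : Int), s1 + (k:Int))) (fun k => ((e0:Int), s1 + (k:Int) + 1))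
    (seg (fun k => (((s0:Int), e1 - (k:Int)), getCell a s0 (e1 - (k:Int) - 1))) d) a hV
    (by intro k hk; refine ⟨⟨?_,?_,?_,?_⟩,⟨?_,?_,?_,?_⟩⟩ <;> simp <;> omega)
    (by intro i j hij hj; simp only [ne_eq, Prod.mk.injEq, not_and]; omega)
    (by intro k hk w hw
        obtain ⟨k', hk', rfl⟩ := mem_seg.mp hw
        refine ⟨⟨?_,?_,?_,?_⟩, ?_⟩ <;> simp <;> omega)
  rw [h2]
  -- loop 3 (left column, top to bottom)
  have h3 := loop_step (s0 := s0) (s1 := s1) (e0 := e0) (e1 := e1) (c := d - 1)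
    (fun k => (s0 + (k:Int), (s1 : Int))) (fun k => (s0 + (k:Int) + 1, (s1:Int)))
    (seg (fun k => (((s0:Int), e1 - (k:Int)), getCell a s0 (e1 - (k:Int) - 1))) d
      ++ seg (fun k => (((e0:Int), s1 + (k:Int)), getCell a e0 (s1 + (k:Int) + 1))) d) a hV
    (by intro k hk; refine ⟨⟨?_,?_,?_,?_⟩,⟨?_,?_,?_,?_⟩⟩ <;> simp <;> omega)
    (by intro i j hij hj; simp only [ne_eq, Prod.mk.injEq, not_and]; omega)
    (by intro k hk w hw
        rcases List.mem_append.mp hw with hw' | hw' <;> obtain ⟨k', hk', rfl⟩ := mem_seg.mp hw' <;>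
          refine ⟨⟨?_,?_,?_,?_⟩, ?_⟩ <;> simp <;> omega)
  rw [h3]
  -- corner write (e0-1, s1)
  have hcat : ∀ (l : List ((Int × Int) × Int)) (x : (Int × Int) × Int),
      step (l.foldl step a) x = (l ++ [x]).foldl step a := by
    intro l x; rw [List.foldl_append]; rfl
  have hs3 : ∀ X, setCell X (e0-1) s1 (getCell a e0 s1)
      = step X (((e0-1 : Int), (s1 : Int)), getCell a e0 s1) := fun _ => rfl
  rw [hs3, hcat]
  -- loop 4 (right column, bottom to top)
  have h4 := loop_step (s0 := s0) (s1 := s1) (e0 := e0) (e1 := e1) (c := d - 1)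
    (fun k => (e0 - (k:Int), (e1 : Int))) (fun k => (e0 - (k:Int) - 1, (e1:Int)))
    ((seg (fun k => (((s0:Int), e1 - (k:Int)), getCell a s0 (e1 - (k:Int) - 1))) d
      ++ seg (fun k => (((e0:Int), s1 + (k:Int)), getCell a e0 (s1 + (k:Int) + 1))) d
      ++ seg (fun k => ((s0 + (k:Int), (s1:Int)), getCell a (s0 + (k:Int) + 1) s1)) (d-1))
      ++ [(((e0 - 1 : Int), (s1 : Int)), getCell a e0 s1)]) a hV
    (by intro k hk; refine ⟨⟨?_,?_,?_,?_⟩,⟨?_,?_,?_,?_⟩⟩ <;> simp <;> omega)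
    (by intro i j hij hj; simp only [ne_eq, Prod.mk.injEq, not_and]; omega)
    (by intro k hk w hw
        rcases List.mem_append.mp hw with hw' | hw'
        · rcases List.mem_append.mp hw' with hw'' | hw''
          · rcases List.mem_append.mp hw'' with hw3 | hw3 <;> obtain ⟨k', hk', rfl⟩ := mem_seg.mp hw3 <;>
              refine ⟨⟨?_,?_,?_,?_⟩, ?_⟩ <;> simp <;> omega
          · obtain ⟨k', hk', rfl⟩ := mem_seg.mp hw''
            refine ⟨⟨?_,?_,?_,?_⟩, ?_⟩ <;> simp <;> omega
        · simp only [List.mem_singleton] at hw'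
          subst hw'
          refine ⟨⟨?_,?_,?_,?_⟩, ?_⟩ <;> simp <;> omega)
  rw [h4]
  have hs4 : ∀ X, setCell X (s0+1) e1 (getCell a s0 e1)
      = step X (((s0+1 : Int), (e1 : Int)), getCell a s0 e1) := fun _ => rfl
  rw [hs4, hcat]
  simp only [List.map_append, map_seg, List.map_cons, List.map_nil, List.append_assoc]
  congr 1
  congr 1
  · apply seg_congr; intro k hk
    simp only [gW]; rw [predq_top (by omega)]
  congr 1
  · apply seg_congr; intro k hk
    simp only [gW]; rw [predq_bottom (by omega) (by omega)]
  congr 1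
  · apply seg_congr; intro k hk
    simp only [gW]; rw [predq_left (by omega) (by omega)]
  congr 1
  · simp only [gW]; rw [predq_left (by omega) (by omega)]; norm_num
  congr 1
  · apply seg_congr; intro k hk
    simp only [gW]; rw [predq_right (by omega)]
  · simp only [gW]; rw [predq_right (by omega)]; norm_num

set_option maxHeartbeats 1000000 in
lemma dests_decomp {s0 s1 e0 e1 : Int} {d : Nat} (hd0 : (d:Int) = e0 - s0)
    (hd1 : (d:Int) = e1 - s1) (hd2 : 2 ≤ d) :
    seg (destC s0 s1 e0 e1 d) (4*d)
      = seg (fun k => ringC s0 s1 e0 e1 d (k+1)) d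
        ++ (seg (fun k => ringC s0 s1 e0 e1 d (d+1+k)) d
        ++ (seg (fun k => ringC s0 s1 e0 e1 d (2*d+1+k)) d
        ++ (seg (fun k => ringC s0 s1 e0 e1 d (3*d+1+k)) (d-1)
        ++ [ringC s0 s1 e0 e1 d 0]))) := by
  rw [singleton_seg, seg_glue, seg_glue, seg_glue, seg_glue,
    show d + (d + (d + (d - 1 + 1))) = 4*d by omega]
  apply seg_congr
  intro k hk
  simp only [destC, ringC]
  split_ifs <;> simp only [Prod.mk.injEq, and_true, true_and] <;> omega

set_option maxHeartbeats 1000000 in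
lemma perm_dests {s0 s1 e0 e1 : Int} {d : Nat} (hd0 : (d:Int) = e0 - s0)
    (hd1 : (d:Int) = e1 - s1) (hd2 : 2 ≤ d) :
    (seg (fun k => ((s0 : Int), e1 - (k:Int))) d
      ++ seg (fun k => ((e0 : Int), s1 + (k:Int))) d
      ++ seg (fun k => ((s0 + (k:Int), (s1 : Int)))) (d-1)
      ++ [((e0 - 1, s1) : Int × Int)]
      ++ seg (fun k => ((e0 - (k:Int), (e1 : Int)))) (d-1)
      ++ [((s0 + 1, e1) : Int × Int)]).Perm (seg (destC s0 s1 e0 e1 d) (4*d)) := by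
  have hT : seg (fun k => ((s0 : Int), e1 - (k:Int))) d
      = (seg (fun k => ringC s0 s1 e0 e1 d (k+1)) d).reverse := by
    rw [reverse_seg]; apply seg_congr; intro k hk
    simp only [ringC]; split_ifs <;> simp only [Prod.mk.injEq, and_true, true_and] <;> omega
  have hB : seg (fun k => ((e0 : Int), s1 + (k:Int))) d
      = (seg (fun k => ringC s0 s1 e0 e1 d (2*d+1+k)) d).reverse := by
    rw [reverse_seg]; apply seg_congr; intro k hk
    simp only [ringC]; split_ifs <;> simp only [Prod.mk.injEq, and_true, true_and] <;> omega
  have hL : seg (fun k => ((s0 + (k:Int), (s1 : Int)))) (d-1) ++ [((e0 - 1, s1) : Int × Int)]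
      = ringC s0 s1 e0 e1 d 0 :: (seg (fun k => ringC s0 s1 e0 e1 d (3*d+1+k)) (d-1)).reverse := by
    conv_rhs => rw [← List.singleton_append]
    rw [reverse_seg, singleton_seg, singleton_seg, seg_glue, seg_glue,
      show 1 + (d-1) = d - 1 + 1 by omega]
    apply seg_congr
    intro k hk
    simp only [ringC]; split_ifs <;> simp only [Prod.mk.injEq, and_true, true_and] <;> omega
  have hR : seg (fun k => ((e0 - (k:Int), (e1 : Int)))) (d-1) ++ [((s0 + 1, e1) : Int × Int)]
      = (seg (fun k => ringC s0 s1 e0 e1 d (d+1+k)) d).reverse := by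
    rw [reverse_seg, singleton_seg, seg_glue, show d - 1 + 1 = d by omega]
    apply seg_congr
    intro k hk
    simp only [ringC]; split_ifs <;> simp only [Prod.mk.injEq, and_true, true_and] <;> omega
  have key : ∀ (t b l3 x3 r4 x4 t' r bt l c0 : Multiset (Int × Int)),
      t = t' → b = bt → l3 + x3 = c0 + l → r4 + x4 = r →
      ((((t + b) + l3) + x3) + r4) + x4 = t' + (r + (bt + (l + c0))) := by
    intro t b l3 x3 r4 x4 t' r bt l c0 h1 h2 h3 h4
    subst h1; subst h2; subst h4
    calc ((((t + b) + l3) + x3) + r4) + x4 = t + (b + ((l3 + x3) + (r4 + x4))) := by abel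
      _ = t + (b + ((c0 + l) + (r4 + x4))) := by rw [h3]
      _ = t + ((r4 + x4) + (b + (l + c0))) := by abel
  rw [← Multiset.coe_eq_coe, dests_decomp hd0 hd1 hd2]
  simp only [← Multiset.coe_add]
  apply key
  · rw [hT, Multiset.coe_reverse]
  · rw [hB, Multiset.coe_reverse]
  · rw [Multiset.coe_add, hL, ← Multiset.cons_coe, Multiset.coe_reverse, ← Multiset.singleton_add,
      Multiset.coe_singleton]
  · rw [Multiset.coe_add, hR, Multiset.coe_reverse]

lemma ring_eq {s0 s1 e0 e1 : Int} {d : Nat} (hd0 : (d:Int) = e0 - s0)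
    (hd1 : (d:Int) = e1 - s1) (hd2 : 2 ≤ d) (a : List (List Int))
    (hV : Valid a s0 s1 e0 e1) :
    setCell
      ((PySem.List.pyRange e0 (s0+1) (-1)).foldl (fun m i => setCell m i e1 (getCell m (i-1) e1))
        (setCell
          ((PySem.List.pyRange s0 (e0-1) 1).foldl (fun m i => setCell m i s1 (getCell m (i+1) s1))
            ((PySem.List.pyRange s1 e1 1).foldl (fun m i => setCell m e0 i (getCell m e0 (i+1)))
              ((PySem.List.pyRange e1 s1 (-1)).foldl (fun m i => setCell m s0 i (getCell m s0 (i-1))) a)))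
          (e0-1) s1 (getCell a e0 s1)))
      (s0+1) e1 (getCell a s0 e1)
    = ((PySem.List.slice (ringCoords s0 s1 e0 e1) (some 1) none ++
        PySem.List.slice (ringCoords s0 s1 e0 e1) none (some 1)).zip
          ((ringCoords s0 s1 e0 e1).map (fun p => getCell a p.1 p.2))).foldl
        (fun m pv => setCell m pv.1.1 pv.1.2 pv.2) a := by
  rw [bodyA_eq hd0 hd1 hd2 a hV, bodyB_eq hd0 hd1 hd2 a]
  apply foldl_step_perm ((perm_dests hd0 hd1 hd2).map (gW a s0 s1 e0 e1)) a hV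
  · intro w hw
    obtain ⟨q, hq, rfl⟩ := List.mem_map.mp hw
    have hq' := (perm_dests hd0 hd1 hd2).mem_iff.mp hq
    obtain ⟨k, hk, rfl⟩ := mem_seg.mp hq'
    show InW s0 s1 e0 e1 (destC s0 s1 e0 e1 d k)
    simp only [destC]
    split_ifs with h
    · exact inW_ringC hd0 hd1 hd2 h
    · exact inW_ringC hd0 hd1 hd2 (by omega)
  · intro w hw w' hw' h
    obtain ⟨q, hq, rfl⟩ := List.mem_map.mp hw
    obtain ⟨q', hq', rfl⟩ := List.mem_map.mp hw'
    simp only [gW] at h ⊢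
    rw [h]

lemma valid_shrink {a : List (List Int)} {s0 s1 e0 e1 : Int} (hV : Valid a s0 s1 e0 e1)
    (h2 : 2 ≤ e0 - 1 - (s0 + 1)) : Valid a (s0+1) (s1+1) (e0-1) (e1-1) := by
  obtain ⟨hd, hd2', hlo, hhi, hlt, hrow⟩ := hV
  refine ⟨by omega, h2, by omega, by omega, by omega, fun i h1 h1' => ?_⟩
  have := hrow i (by omega) (by omega)
  exact ⟨by omega, by omega, by omega⟩

lemma rot_eq : ∀ (k fa fb : Nat) (s0 s1 e0 e1 : Int) (a : List (List Int)),
    e0 - s0 = 2*(k:Int) → e1 - s1 = 2*(k:Int) → k < fa → k < fb →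
    (k = 0 ∨ Valid a s0 s1 e0 e1) →
    rotA fa (s0, s1) (e0, e1) a = rotB fb s0 s1 e0 e1 a := by
  intro k
  induction k with
  | zero =>
    intro fa fb s0 s1 e0 e1 a hk0 hk1 hfa hfb _
    obtain ⟨fa', rfl⟩ : ∃ m, fa = m + 1 := ⟨fa - 1, by omega⟩
    obtain ⟨fb', rfl⟩ : ∃ m, fb = m + 1 := ⟨fb - 1, by omega⟩
    have hse : s0 = e0 ∧ s1 = e1 := by omega
    rw [rotA, rotB, if_pos (by simp [Prod.ext_iff]; omega), if_pos (by simp [Prod.ext_iff]; omega)]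
  | succ k ih =>
    intro fa fb s0 s1 e0 e1 a hk0 hk1 hfa hfb hV
    rcases hV with h0 | hV
    · omega
    obtain ⟨fa', rfl⟩ : ∃ m, fa = m + 1 := ⟨fa - 1, by omega⟩
    obtain ⟨fb', rfl⟩ : ∃ m, fb = m + 1 := ⟨fb - 1, by omega⟩
    rw [rotA, rotB, if_neg (by simp [Prod.ext_iff]; omega), if_neg (by simp [Prod.ext_iff]; omega)]
    simp only []
    have hd0 : ((2*(k+1) : Nat) : Int) = e0 - s0 := by push_cast; omega
    have hd1 : ((2*(k+1) : Nat) : Int) = e1 - s1 := by push_cast; omega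
    have hd2 : 2 ≤ 2*(k+1) := by omega
    rw [ring_eq hd0 hd1 hd2 a hV]
    apply ih fa' fb' (s0+1) (s1+1) (e0-1) (e1-1) _ (by omega) (by omega) (by omega) (by omega)
    rcases Nat.eq_zero_or_pos k with hk | hk
    · exact Or.inl hk
    · refine Or.inr ?_
      have hVs := valid_shrink hV (by omega)
      exact hVs.congr (length_foldl_step _ _) (rowLen_foldl_step _ _)

theorem main_thm (start end_ : Int × Int) (arr : List (List Int)) (hP : Pre_execute_rotate start end_ arr) :
    rotA ((end_.1 - start.1).natAbs + 1) start end_ arr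
      = rotB ((end_.1 - start.1).natAbs + 1) start.1 start.2 end_.1 end_.2 arr := by
  obtain ⟨s0, s1⟩ := start
  obtain ⟨e0, e1⟩ := end_
  rcases hP with hse | ⟨hdeq, hdpos, ⟨t, ht⟩, hlo, hhi, hlt, hrows⟩
  · injection hse with h1 h2
    subst h1; subst h2
    exact rot_eq 0 _ _ s0 s1 s0 s1 arr (by omega) (by omega) (by omega) (by omega) (Or.inl rfl)
  · simp only [] at hdeq hdpos ht hlo hhi hlt hrows
    have hVal : Valid arr s0 s1 e0 e1 := by
      refine ⟨hdeq, by omega, hlo, hhi, hlt, fun i h1 h2 => ?_⟩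
      have hmem : i ∈ PySem.List.pyRange s0 (e0 + 1) 1 := by
        rw [pyRange_one_seg, mem_seg]
        exact ⟨(i - s0).toNat, by omega, by omega⟩
      have hcond := hrows i hmem
      rw [pyGetD_row arr i (by omega) (by omega)] at hcond
      exact ⟨by simpa [rowLen] using hcond.1, by simpa [rowLen] using hcond.2.1,
        by simpa [rowLen] using hcond.2.2⟩
    exact rot_eq t.toNat _ _ s0 s1 e0 e1 arr (by omega) (by omega)
      (by omega) (by omega) (Or.inr hVal)

-- ===== VERDICT (by name: the statement is the Claim_ definition above) =====
theorem execute_rotate_spec : Claim_equal_execute_rotate := by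
  intro start end_ _arr _ hP
  show execute_rotate start end_ _arr = execute_rotate_alt start end_ _arr
  unfold execute_rotate execute_rotate_alt
  exact main_thm start end_ _arr hP
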